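-- pv_equiv track=rewrite | github.com/KhoiBui16/28Tech_Code_Online | Python/Source Code Python Contest/Contest_03_HamVaLyThuyetSo/Bai32_ThuaSoNguyenToThuK.py | pos_of_prime_divisors
-- ===== SOURCE A (Python) =====
-- import math
--
-- def pos_of_prime_divisors(n, k):
--     cnt = 0
--     for i in range(2, math.isqrt(n) + 1):
--         if n % i == 0:
--             while n % i == 0:
--                 cnt += 1
--                 if cnt == k:
--                     return i
--                 n //= i
--
--     if n > 1:
--         cnt += 1
--         if cnt == k:
--             return n
--     return -1
-- ===== SOURCE B (Python) =====
-- import math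
--
-- def smallest_prime_factor(n):
--     for d in range(2, math.isqrt(n) + 1):
--         if n % d == 0:
--             return d
--     return n
--
-- def pos_of_prime_divisors(n, k):
--     if k < 1:
--         return -1
--     while n > 1:
--         p = smallest_prime_factor(n)
--         if k == 1:
--             return p
--         k -= 1
--         n //= p
--     return -1
-- ===== Notes on version B (the rewrite author's own statement) =====
-- stated objective: alternative
-- what changed: B repeatedly extracts the smallest prime factor of the current n (a fresh minimal-divisor search each round, peeling one factor per iteration and decrementing k), instead of A's single trial-division sweep with an inner exhaust-the-prime while loop and a multiplicity counter.
-- crash fix: For n < 0 A raises ValueError in math.isqrt; B never calls isqrt there and returns -1. — e.g. on pos_of_prime_divisors(-4, 1): A raises ValueError, B returns -1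
import Mathlib
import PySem

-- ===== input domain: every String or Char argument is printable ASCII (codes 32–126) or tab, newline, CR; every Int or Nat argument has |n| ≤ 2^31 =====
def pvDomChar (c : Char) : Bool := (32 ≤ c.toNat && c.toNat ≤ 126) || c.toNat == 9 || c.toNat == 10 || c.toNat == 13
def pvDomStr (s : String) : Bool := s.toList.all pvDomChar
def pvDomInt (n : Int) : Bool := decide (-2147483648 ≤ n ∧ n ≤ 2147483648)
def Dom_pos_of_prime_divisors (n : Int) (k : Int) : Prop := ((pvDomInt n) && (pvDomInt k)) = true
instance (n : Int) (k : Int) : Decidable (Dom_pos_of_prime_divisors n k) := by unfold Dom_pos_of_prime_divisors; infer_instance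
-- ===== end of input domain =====

-- B peels off the smallest prime factor of the current n one round at a time (a fresh
-- minimal-divisor search each round, decrementing k), instead of A's single trial-division
-- sweep with an inner while loop and a multiplicity counter; alternative decomposition,
-- proved equal to A for all n ≥ 0 (A raises ValueError in math.isqrt for n < 0, hence Pre_).

-- ===== PORT A =====
-- math.isqrt(n), exact for n ≥ 0 (Pre_ requires 0 ≤ n; Python raises ValueError for n < 0)
def pvIsqrt (n : Int) : Int := (Nat.sqrt n.toNat : Int)

-- A's inner `while n % i == 0` with early return: Sum.inl r = `return r`, Sum.inr = loop ended
-- with updated (n, cnt).  fuel = n.toNat + 1 is a termination guard only (never exhausted on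
-- the admitted inputs, where 0 < n and 2 ≤ i inside the loop).
def pvAinner (fuel : Nat) (i n cnt k : Int) : Sum Int (Int × Int) :=
  match fuel with
  | 0 => Sum.inr (n, cnt)
  | fuel + 1 =>
    if PySem.Int.mod n i = 0 then
      if cnt + 1 = k then Sum.inl i
      else pvAinner fuel i (PySem.Int.floordiv n i) (cnt + 1) k
    else Sum.inr (n, cnt)

-- A's `for i in range(...)` with the early return threaded through
def pvAloop (rs : List Int) (n cnt k : Int) : Int :=
  match rs with
  | [] => if n > 1 then (if cnt + 1 = k then n else -1) else -1
  | i :: rs =>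
    if PySem.Int.mod n i = 0 then
      match pvAinner (n.toNat + 1) i n cnt k with
      | Sum.inl r => r
      | Sum.inr (n', cnt') => pvAloop rs n' cnt' k
    else pvAloop rs n cnt k

def pos_of_prime_divisors (n : Int) (k : Int) : Int :=
  pvAloop (PySem.List.pyRange 2 (pvIsqrt n + 1) 1) n 0 k

-- ===== PORT B =====
-- B's helper smallest_prime_factor: for-loop returning the first divisor found, else n
def pvSpfLoop (rs : List Int) (n : Int) : Int :=
  match rs with
  | [] => n
  | d :: rs => if PySem.Int.mod n d = 0 then d else pvSpfLoop rs n

def pvSpf (n : Int) : Int := pvSpfLoop (PySem.List.pyRange 2 (pvIsqrt n + 1) 1) n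

-- termination facts for B's while loop (cited by name in decreasing_by)
theorem pvSpfLoop_two_le (rs : List Int) (n : Int) (hrs : ∀ d ∈ rs, 2 ≤ d) (hn : 2 ≤ n) :
    2 ≤ pvSpfLoop rs n := by
  induction rs with
  | nil => exact hn
  | cons d rs ih =>
    by_cases h : PySem.Int.mod n d = 0
    · simpa [pvSpfLoop, h] using hrs d (List.mem_cons_self ..)
    · simpa [pvSpfLoop, h] using ih (fun e he => hrs e (List.mem_cons_of_mem _ he))

theorem pvSpf_two_le (n : Int) (hn : 2 ≤ n) : 2 ≤ pvSpf n :=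
  pvSpfLoop_two_le _ n (fun d hd => ((PySem.List.mem_pyRange_one).mp hd).1) hn

theorem pvBwhile_dec (n : Int) (h : 1 < n) :
    (PySem.Int.floordiv n (pvSpf n)).toNat < n.toNat := by
  have hp : 2 ≤ pvSpf n := pvSpf_two_le n (by omega)
  have h1 : PySem.Int.floordiv n (pvSpf n) < n :=
    (PySem.Int.floordiv_lt_iff_lt_mul (by omega)).mpr (by nlinarith)
  have h2 : (0 : Int) ≤ PySem.Int.floordiv n (pvSpf n) :=
    (PySem.Int.le_floordiv_iff_mul_le (by omega)).mpr (by omega)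
  omega

-- B's `while n > 1` loop (mutating n and k)
def pvBwhile (n k : Int) : Int :=
  if h : n > 1 then
    let p := pvSpf n
    if k = 1 then p else pvBwhile (PySem.Int.floordiv n p) (k - 1)
  else -1
termination_by n.toNat
decreasing_by exact pvBwhile_dec n h

def pos_of_prime_divisors_alt (n : Int) (k : Int) : Int :=
  if k < 1 then -1 else pvBwhile n k

-- ===== PRECONDITION & SPEC =====
-- Pre_ excludes exactly n < 0, where Python's math.isqrt(n) raises ValueError in A.
def Pre_pos_of_prime_divisors (n : Int) (k : Int) : Prop := 0 ≤ n
instance (n : Int) (k : Int) : Decidable (Pre_pos_of_prime_divisors n k) := by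
  unfold Pre_pos_of_prime_divisors; infer_instance
def pvWitness_pos_of_prime_divisors : Int × Int := (360, 3)

-- For n < 0 A raises ValueError in math.isqrt; B never calls isqrt there and returns -1.
def Raises_pos_of_prime_divisors (n : Int) (k : Int) : Prop := n < 0
instance (n : Int) (k : Int) : Decidable (Raises_pos_of_prime_divisors n k) := by
  unfold Raises_pos_of_prime_divisors; infer_instance
def pvRaiseWitness_pos_of_prime_divisors : Int × Int := (-4, 1)
def pvRaiseWitnessOut_pos_of_prime_divisors : Int := -1

def Spec_pos_of_prime_divisors (n : Int) (k : Int) (out : Int) : Prop := out = pos_of_prime_divisors_alt n k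
instance (n : Int) (k : Int) (out : Int) : Decidable (Spec_pos_of_prime_divisors n k out) := by unfold Spec_pos_of_prime_divisors; infer_instance

-- ===== CLAIM (what is proved, stated in full; the proofs are below) =====
def Claim_equal_pos_of_prime_divisors : Prop := ∀ (n : Int) (k : Int), Dom_pos_of_prime_divisors n k → Pre_pos_of_prime_divisors n k → Spec_pos_of_prime_divisors n k (pos_of_prime_divisors n k)

def Claim_raises_pos_of_prime_divisors : Prop := (∀ (n : Int) (k : Int), Dom_pos_of_prime_divisors n k → Raises_pos_of_prime_divisors n k → ¬ Pre_pos_of_prime_divisors n k) ∧ (Dom_pos_of_prime_divisors (pvRaiseWitness_pos_of_prime_divisors.1) (pvRaiseWitness_pos_of_prime_divisors.2) ∧ Raises_pos_of_prime_divisors (pvRaiseWitness_pos_of_prime_divisors.1) (pvRaiseWitness_pos_of_prime_divisors.2) ∧ pos_of_prime_divisors_alt (pvRaiseWitness_pos_of_prime_divisors.1) (pvRaiseWitness_pos_of_prime_divisors.2) = pvRaiseWitnessOut_pos_of_prime_divisors)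

-- ===== LEMMAS AND PROOFS =====

-- the common characterization: both programs select the (k-1)-st element of the ascending
-- prime factorization with multiplicity (Nat.primeFactorsList), or -1 when k is out of range.
def pvSelect (fs : List Int) (j : Int) : Int :=
  if 1 ≤ j ∧ j ≤ (fs.length : Int) then (PySem.List.pyGet? fs (j - 1)).getD (-1) else -1

def pvFactors (n : Int) : List Int := (n.toNat.primeFactorsList).map (fun p => (p : Int))

-- proof-side model of plain trial division (A's loops without the early return)
def pvBinner (fuel : Nat) (i n : Int) (acc : List Int) : Int × List Int :=
  match fuel with
  | 0 => (n, acc)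
  | fuel + 1 =>
    if PySem.Int.mod n i = 0 then pvBinner fuel i (PySem.Int.floordiv n i) (acc ++ [i])
    else (n, acc)

def pvBloop (rs : List Int) (n : Int) (acc : List Int) : Int × List Int :=
  match rs with
  | [] => (n, acc)
  | i :: rs =>
    let p := pvBinner (n.toNat + 1) i n acc
    pvBloop rs p.1 p.2

def pvMkFull (p : Int × List Int) : List Int := if p.1 > 1 then p.2 ++ [p.1] else p.2

theorem pvSelect_nil (j : Int) : pvSelect [] j = -1 := by
  simp [pvSelect]; omega

theorem pvSelect_replicate_hit (m : Nat) (i : Int) (L : List Int) (j : Int)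
    (h1 : 1 ≤ j) (h2 : j ≤ (m : Int)) :
    pvSelect (List.replicate m i ++ L) j = i := by
  have hlen : ((List.replicate m i ++ L).length : Int) = (m : Int) + L.length := by
    simp
  have hj : j ≤ ((List.replicate m i ++ L).length : Int) := by omega
  have hnn : 0 ≤ j - 1 := by omega
  have hlt : j - 1 < ((List.replicate m i ++ L).length : Int) := by omega
  rw [pvSelect, if_pos ⟨h1, hj⟩,
    PySem.List.pyGet?_eq_some_getElem _ hnn hlt]
  have hm : (j - 1).toNat < m := by omega
  simp [List.getElem_append]
  exact fun h => absurd h (by omega)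

theorem pvSelect_replicate_miss (m : Nat) (i : Int) (L : List Int) (j : Int)
    (h : ¬ (1 ≤ j ∧ j ≤ (m : Int))) :
    pvSelect (List.replicate m i ++ L) j = pvSelect L (j - m) := by
  have hlen : ((List.replicate m i ++ L).length : Int) = (m : Int) + L.length := by simp
  by_cases hj1 : 1 ≤ j
  · have hjm : (m : Int) < j := by omega
    by_cases hj2 : j - m ≤ (L.length : Int)
    · have hnn : (0 : Int) ≤ j - 1 := by omega
      have hlt : j - 1 < ((List.replicate m i ++ L).length : Int) := by omega
      rw [pvSelect, pvSelect, if_pos ⟨by omega, by omega⟩,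
        if_pos ⟨by omega, hj2⟩,
        PySem.List.pyGet?_eq_some_getElem _ hnn hlt,
        PySem.List.pyGet?_eq_some_getElem _ (by omega) (by omega)]
      have hm : ¬ (j - 1).toNat < m := by omega
      simp only [Option.getD_some]
      rw [List.getElem_append_right (by simpa using hm)]
      congr 1
      simp; omega
    · rw [pvSelect, pvSelect, if_neg (by omega), if_neg (by omega)]
  · rw [pvSelect, pvSelect, if_neg (by omega), if_neg (by omega)]

theorem pvSelect_cons_hit (x : Int) (L : List Int) : pvSelect (x :: L) 1 = x := by
  simpa using pvSelect_replicate_hit 1 x L 1 (by omega) (by simp)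

theorem pvSelect_cons_miss (x : Int) (L : List Int) (j : Int) (h : j ≠ 1) :
    pvSelect (x :: L) j = pvSelect L (j - 1) := by
  by_cases hj : 1 ≤ j
  · simpa using pvSelect_replicate_miss 1 x L j (by simp; omega)
  · simpa using pvSelect_replicate_miss 1 x L j (by omega)

-- dvd/cast bookkeeping
theorem pvDvd_toNat (d n : Int) (hd : 0 ≤ d) (hn : 0 ≤ n) :
    d ∣ n ↔ d.toNat ∣ n.toNat := by
  conv_lhs => rw [← Int.toNat_of_nonneg hd, ← Int.toNat_of_nonneg hn]
  exact Int.natCast_dvd_natCast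

-- if i divides n and nothing in [2, i) does, i is the least prime factor
theorem pvMinFac_eq (n i : Int) (h2 : 2 ≤ i) (hn : 2 ≤ n) (hdvd : i ∣ n)
    (hmin : ∀ d : Int, 2 ≤ d → d < i → ¬ d ∣ n) : (n.toNat.minFac : Int) = i := by
  have hne : n.toNat ≠ 1 := by omega
  have hmf2 : 2 ≤ n.toNat.minFac := (Nat.minFac_prime hne).two_le
  have hmfdvd : (n.toNat.minFac : Int) ∣ n := by
    rw [pvDvd_toNat _ _ (by positivity) (by omega)]
    simpa using Nat.minFac_dvd n.toNat
  have hle : n.toNat.minFac ≤ i.toNat :=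
    Nat.minFac_le_of_dvd (by omega) ((pvDvd_toNat i n (by omega) (by omega)).mp hdvd)
  by_contra hne'
  exact hmin (n.toNat.minFac : Int) (by exact_mod_cast hmf2) (by omega) hmfdvd

-- no divisor up to the square root ⇒ prime
theorem pvPrime_of_no_small (n : Int) (hn : 2 ≤ n)
    (h : ∀ d : Int, 2 ≤ d → d ≤ (Nat.sqrt n.toNat : Int) → ¬ d ∣ n) : n.toNat.Prime := by
  by_contra hnp
  have hsq : n.toNat.minFac ^ 2 ≤ n.toNat := Nat.minFac_sq_le_self (by omega) hnp
  have hmf2 : 2 ≤ n.toNat.minFac := (Nat.minFac_prime (by omega)).two_le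
  have hle : n.toNat.minFac ≤ Nat.sqrt n.toNat := by
    rw [Nat.le_sqrt]; nlinarith
  exact h (n.toNat.minFac : Int) (by exact_mod_cast hmf2) (by exact_mod_cast hle)
    (by rw [pvDvd_toNat _ _ (by positivity) (by omega)]; simpa using Nat.minFac_dvd n.toNat)

-- exact division: for 2 ≤ i ∣ n, 1 ≤ n, floordiv gives the cofactor
theorem pvFloordiv_cofactor (n i : Int) (h2 : 2 ≤ i) (hn : 1 ≤ n) (hdvd : i ∣ n) :
    ∃ q : Int, PySem.Int.floordiv n i = q ∧ n = i * q ∧ 1 ≤ q ∧ q < n ∧ q ∣ n ∧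
      q = ((n.toNat / i.toNat : Nat) : Int) := by
  obtain ⟨q, hq⟩ := hdvd
  have hq1 : 1 ≤ q := by nlinarith
  have hfd : PySem.Int.floordiv n i = q := by
    rw [PySem.Int.floordiv_eq_iff_of_pos (by omega)]
    constructor <;> nlinarith
  refine ⟨q, hfd, hq, hq1, by nlinarith, ⟨i, by rw [hq]; ring⟩, ?_⟩
  have hcast : PySem.Int.floordiv ((n.toNat : Int)) ((i.toNat : Int)) = ((n.toNat / i.toNat : Nat) : Int) :=
    PySem.Int.floordiv_natCast n.toNat i.toNat
  rw [Int.toNat_of_nonneg (by omega), Int.toNat_of_nonneg (by omega), hfd] at hcast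
  omega

-- one unfolding of Nat.primeFactorsList for 2 ≤ t
theorem pvPF_cons (t : Nat) (h : 2 ≤ t) :
    t.primeFactorsList = t.minFac :: (t / t.minFac).primeFactorsList := by
  obtain ⟨t', rfl⟩ : ∃ t', t = t' + 2 := ⟨t - 2, by omega⟩
  exact Nat.primeFactorsList_add_two t'

theorem pvFactors_cons (n i q : Int) (hn : 2 ≤ n) (hmf : (n.toNat.minFac : Int) = i)
    (hq : q = ((n.toNat / i.toNat : Nat) : Int)) : pvFactors n = i :: pvFactors q := by
  have h2 : 2 ≤ n.toNat := by omega
  have hiq : i.toNat = n.toNat.minFac := by omega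
  have hqn : q.toNat = n.toNat / n.toNat.minFac := by
    rw [hq, Int.toNat_natCast, hiq]
  simp only [pvFactors, pvPF_cons n.toNat h2, hqn]
  rw [← hmf]
  rfl

-- B's divisor scan computes Nat.minFac
theorem pvSpfLoop_minFac (j : Nat) :
    ∀ (i s n : Int), (s - i).toNat = j → 2 ≤ i → 2 ≤ n →
      (∀ d : Int, 2 ≤ d → d < i → ¬ d ∣ n) → (Nat.sqrt n.toNat : Int) < s →
      pvSpfLoop (PySem.List.pyRange i s 1) n = (n.toNat.minFac : Int) := by
  induction j with
  | zero =>
    intro i s n hj h2 hn hmin hs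
    have hr : PySem.List.pyRange i s 1 = [] := by
      rw [PySem.List.pyRange_one]
      have : (s - i).toNat = 0 := by omega
      rw [this]; rfl
    rw [hr]
    have hp : n.toNat.Prime :=
      pvPrime_of_no_small n hn (fun d hd1 hd2 => hmin d hd1 (by omega))
    have heq : (n.toNat.minFac : Int) = (n.toNat : Int) := by exact_mod_cast hp.minFac_eq
    rw [pvSpfLoop, heq, Int.toNat_of_nonneg (by omega)]
  | succ j ih =>
    intro i s n hj h2 hn hmin hs
    have his : i < s := by omega
    rw [PySem.List.pyRange_one_cons his]
    by_cases h : PySem.Int.mod n i = 0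
    · rw [pvSpfLoop, if_pos h]
      exact (pvMinFac_eq n i h2 hn ((PySem.Int.mod_eq_zero_iff_dvd n i).mp h) hmin).symm
    · rw [pvSpfLoop, if_neg h]
      refine ih (i + 1) s n (by omega) (by omega) hn ?_ hs
      intro d hd1 hd2 hdvd
      by_cases hdi : d < i
      · exact hmin d hd1 hdi hdvd
      · have hde : d = i := by omega
        subst hde
        exact h ((PySem.Int.mod_eq_zero_iff_dvd n d).mpr hdvd)

theorem pvSpf_minFac (n : Int) (hn : 2 ≤ n) : pvSpf n = (n.toNat.minFac : Int) := by
  refine pvSpfLoop_minFac (pvIsqrt n + 1 - 2).toNat 2 (pvIsqrt n + 1) n rfl (by omega) hn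
    (fun d hd1 hd2 h => by omega) ?_
  unfold pvIsqrt; omega

-- B's while loop selects from the prime factor list
theorem pvBwhile_eq (m : Nat) : ∀ (n k : Int), n.toNat = m → 0 ≤ n → 1 ≤ k →
    pvBwhile n k = pvSelect (pvFactors n) k := by
  induction m using Nat.strong_induction_on with
  | _ m ih =>
    intro n k hm h0 hk
    by_cases hn : n > 1
    · have hn2 : 2 ≤ n := by omega
      have hmf : pvSpf n = (n.toNat.minFac : Int) := pvSpf_minFac n hn2
      have hi2 : 2 ≤ pvSpf n := pvSpf_two_le n hn2
      have hidvd : pvSpf n ∣ n := by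
        rw [hmf, pvDvd_toNat _ _ (by positivity) (by omega)]
        simpa using Nat.minFac_dvd n.toNat
      obtain ⟨q, hfd, hqe, hq1, hqlt, hqdvd, hqnat⟩ :=
        pvFloordiv_cofactor n (pvSpf n) hi2 (by omega) hidvd
      have hfac : pvFactors n = pvSpf n :: pvFactors q :=
        pvFactors_cons n (pvSpf n) q hn2 hmf.symm (by rw [hqnat])
      rw [pvBwhile, dif_pos hn]
      by_cases hk1 : k = 1
      · rw [if_pos hk1, hfac, hk1, pvSelect_cons_hit]
      · rw [if_neg hk1, hfd]
        rw [ih q.toNat (by omega) q (k - 1) rfl (by omega) (by omega)]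
        rw [hfac, pvSelect_cons_miss _ _ _ hk1]
    · rw [pvBwhile, dif_neg hn]
      have : n.toNat = 0 ∨ n.toNat = 1 := by omega
      rcases this with h | h <;>
        simp [pvFactors, h, Nat.primeFactorsList_zero, Nat.primeFactorsList_one, pvSelect_nil]

-- accumulator lemmas for the trial-division model
theorem pvBinner_acc (fuel : Nat) (i : Int) :
    ∀ (n : Int) (acc : List Int),
      pvBinner fuel i n acc = ((pvBinner fuel i n []).1, acc ++ (pvBinner fuel i n []).2) := by
  induction fuel with
  | zero => intro n acc; simp [pvBinner]
  | succ f ih =>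
    intro n acc
    by_cases h : PySem.Int.mod n i = 0
    · simp only [pvBinner, if_pos h]
      rw [ih _ (acc ++ [i]), ih _ ([] ++ [i])]
      simp
    · simp [pvBinner, h]

theorem pvBloop_acc (rs : List Int) :
    ∀ (n : Int) (acc : List Int),
      pvBloop rs n acc = ((pvBloop rs n []).1, acc ++ (pvBloop rs n []).2) := by
  induction rs with
  | nil => intro n acc; simp [pvBloop]
  | cons i rs ih =>
    intro n acc
    have hbin := pvBinner_acc (n.toNat + 1) i n acc
    simp only [pvBloop, hbin]
    rw [ih (pvBinner (n.toNat + 1) i n []).1 (acc ++ (pvBinner (n.toNat + 1) i n []).2),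
      ih (pvBinner (n.toNat + 1) i n []).1 (pvBinner (n.toNat + 1) i n []).2]
    simp

-- the inner while loops: the model emits replicate m i, A finds i iff cnt < k ≤ cnt + m
theorem pvInner_spec (fuel : Nat) :
    ∀ (i n cnt k : Int), 2 ≤ i → 0 < n → n.toNat < fuel →
      ∃ (m : Nat) (n' : Int),
        pvBinner fuel i n [] = (n', List.replicate m i) ∧
        0 < n' ∧ n'.toNat ≤ n.toNat ∧
        pvAinner fuel i n cnt k =
          (if cnt < k ∧ k ≤ cnt + (m : Int) then Sum.inl i else Sum.inr (n', cnt + m)) := by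
  induction fuel with
  | zero => intro i n cnt k hi hn hf; omega
  | succ f ih =>
    intro i n cnt k hi hn hf
    by_cases h : PySem.Int.mod n i = 0
    · have hdvd : i ∣ n := (PySem.Int.mod_eq_zero_iff_dvd n i).mp h
      obtain ⟨q, hq⟩ := hdvd
      have hipos : (0 : Int) < i := by omega
      have hq0 : 0 < q := by nlinarith
      have hfd : PySem.Int.floordiv n i = q := by
        rw [PySem.Int.floordiv_eq_iff_of_pos hipos]
        constructor <;> nlinarith
      have hqn : q.toNat < n.toNat := by
        have : q < n := by nlinarith
        omega
      have hrec := ih i q (cnt + 1) k hi hq0 (by omega)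
      obtain ⟨m, n', hB, hn', hle, hA⟩ := hrec
      refine ⟨m + 1, n', ?_, hn', by omega, ?_⟩
      · have h1 : (pvBinner f i q []).1 = n' := by rw [hB]
        have h2 : (pvBinner f i q []).2 = List.replicate m i := by rw [hB]
        simp only [pvBinner, if_pos h, hfd]
        rw [pvBinner_acc]
        simp [h1, h2, List.replicate_succ]
      · simp only [pvAinner, if_pos h, hfd]
        by_cases hk : cnt + 1 = k
        · rw [if_pos hk, if_pos (by push_cast; omega)]
        · rw [if_neg hk, hA]
          by_cases hc : cnt + 1 < k ∧ k ≤ cnt + 1 + (m : Int)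
          · rw [if_pos hc, if_pos (by push_cast; omega)]
          · rw [if_neg hc, if_neg (by push_cast; omega)]
            congr 2
            push_cast; omega
    · refine ⟨0, n, ?_, hn, le_refl _, ?_⟩
      · simp [pvBinner, h]
      · simp only [pvAinner, if_neg h]
        rw [if_neg (by omega)]
        simp

-- A's interrupted traversal equals selection from the model's full factor list
theorem pvLoop_spec (k : Int) (rs : List Int) :
    ∀ (n cnt : Int), 0 < n → (∀ i ∈ rs, 2 ≤ i) →
      pvAloop rs n cnt k = pvSelect (pvMkFull (pvBloop rs n [])) (k - cnt) := by
  induction rs with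
  | nil =>
    intro n cnt hn _
    simp only [pvAloop, pvBloop, pvMkFull]
    by_cases h1 : n > 1
    · rw [if_pos h1, if_pos h1]
      by_cases hk : cnt + 1 = k
      · rw [if_pos hk]
        have : pvSelect ([] ++ [n]) (k - cnt) = n := by
          have := pvSelect_replicate_hit 1 n [] (k - cnt) (by omega) (by push_cast; omega)
          simpa using this
        simpa using this.symm
      · rw [if_neg hk, pvSelect]
        rw [if_neg (by simp; omega)]
    · rw [if_neg h1, if_neg h1, pvSelect_nil]
  | cons i rs ih =>
    intro n cnt hn hmem
    have hi : 2 ≤ i := hmem i (List.mem_cons_self ..)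
    have hmem' : ∀ j ∈ rs, 2 ≤ j := fun j hj => hmem j (List.mem_cons_of_mem _ hj)
    by_cases h : PySem.Int.mod n i = 0
    · obtain ⟨m, n', hB, hn', _, hA⟩ :=
        pvInner_spec (n.toNat + 1) i n cnt k hi hn (by omega)
      have hBloop : pvBloop (i :: rs) n [] =
          ((pvBloop rs n' []).1, List.replicate m i ++ (pvBloop rs n' []).2) := by
        simp only [pvBloop, hB]
        rw [pvBloop_acc]
      have hMk : pvMkFull (pvBloop (i :: rs) n []) =
          List.replicate m i ++ pvMkFull (pvBloop rs n' []) := by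
        rw [hBloop, pvMkFull, pvMkFull]
        by_cases hgt : (pvBloop rs n' []).1 > 1 <;> simp [hgt]
      by_cases hc : cnt < k ∧ k ≤ cnt + (m : Int)
      · rw [if_pos hc] at hA
        simp only [pvAloop, if_pos h, hA]
        show i = _
        rw [hMk, pvSelect_replicate_hit _ _ _ _ (by omega) (by omega)]
      · rw [if_neg hc] at hA
        simp only [pvAloop, if_pos h, hA]
        show pvAloop rs n' (cnt + (m : Int)) k = _
        rw [hMk, pvSelect_replicate_miss _ _ _ _ (by omega)]
        rw [ih n' (cnt + m) hn' hmem']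
        congr 1
        omega
    · have hB0 : pvBinner (n.toNat + 1) i n [] = (n, []) := by
        simp [pvBinner, h]
      simp only [pvAloop, if_neg h, pvBloop, hB0]
      exact ih n cnt hn hmem'

-- the inner division loop of the model peels a prefix of the prime factor list
theorem pvBinner_fact (fuel : Nat) :
    ∀ (i n : Int), 2 ≤ i → 1 ≤ n → n.toNat < fuel →
      (∀ d : Int, 2 ≤ d → d < i → ¬ d ∣ n) →
      1 ≤ (pvBinner fuel i n []).1 ∧ (pvBinner fuel i n []).1 ∣ n ∧
        ¬ i ∣ (pvBinner fuel i n []).1 ∧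
        pvFactors n = (pvBinner fuel i n []).2 ++ pvFactors (pvBinner fuel i n []).1 := by
  induction fuel with
  | zero => intro i n hi hn hf _; omega
  | succ f ih =>
    intro i n hi hn hf hmin
    by_cases h : PySem.Int.mod n i = 0
    · have hdvd : i ∣ n := (PySem.Int.mod_eq_zero_iff_dvd n i).mp h
      have hn2 : 2 ≤ n := le_trans hi (Int.le_of_dvd (by omega) hdvd)
      have hmf : (n.toNat.minFac : Int) = i := pvMinFac_eq n i hi hn2 hdvd hmin
      obtain ⟨q, hfd, hqe, hq1, hqlt, hqdvd, hqnat⟩ := pvFloordiv_cofactor n i hi hn hdvd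
      have hmin' : ∀ d : Int, 2 ≤ d → d < i → ¬ d ∣ q := fun d hd1 hd2 hddvd =>
        hmin d hd1 hd2 (hddvd.trans hqdvd)
      obtain ⟨h1, h2, h3, h4⟩ := ih i q hi hq1 (by omega) hmin'
      have hfac : pvFactors n = i :: pvFactors q := pvFactors_cons n i q hn2 hmf hqnat
      have heq : pvBinner (f + 1) i n [] =
          ((pvBinner f i q []).1, [i] ++ (pvBinner f i q []).2) := by
        simp only [pvBinner, if_pos h, hfd]
        rw [pvBinner_acc]
        rfl
      rw [heq]
      refine ⟨h1, h2.trans hqdvd, h3, ?_⟩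
      rw [hfac, h4]
      rfl
    · have heq : pvBinner (f + 1) i n [] = (n, []) := by simp [pvBinner, h]
      rw [heq]
      exact ⟨hn, dvd_refl n, fun hdvd => h ((PySem.Int.mod_eq_zero_iff_dvd n i).mpr hdvd),
        rfl⟩

-- the trial-division model computes the prime factor list
theorem pvBloop_fact (j : Nat) :
    ∀ (i s n : Int), (s - i).toNat = j → 2 ≤ i → 1 ≤ n →
      (∀ d : Int, 2 ≤ d → d < i → ¬ d ∣ n) → (Nat.sqrt n.toNat : Int) < s →
      pvMkFull (pvBloop (PySem.List.pyRange i s 1) n []) = pvFactors n := by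
  induction j with
  | zero =>
    intro i s n hj h2 hn hmin hs
    have hr : PySem.List.pyRange i s 1 = [] := by
      rw [PySem.List.pyRange_one]
      have h0 : (s - i).toNat = 0 := by omega
      rw [h0]; rfl
    rw [hr]
    by_cases h1 : n > 1
    · have hp : n.toNat.Prime :=
        pvPrime_of_no_small n (by omega) (fun d hd1 hd2 => hmin d hd1 (by omega))
      simp only [pvBloop, pvMkFull, if_pos h1]
      rw [pvFactors, Nat.primeFactorsList_prime hp]
      simp [Int.toNat_of_nonneg (show (0:Int) ≤ n by omega)]
    · have hn1 : n.toNat = 1 := by omega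
      simp [pvBloop, pvMkFull, h1, pvFactors, hn1, Nat.primeFactorsList_one]
  | succ j ih =>
    intro i s n hj h2 hn hmin hs
    have his : i < s := by omega
    rw [PySem.List.pyRange_one_cons his]
    obtain ⟨hb1, hbdvd, hbni, hblist⟩ :=
      pvBinner_fact (n.toNat + 1) i n h2 hn (by omega) hmin
    have hmin' : ∀ d : Int, 2 ≤ d → d < i + 1 → ¬ d ∣ (pvBinner (n.toNat + 1) i n []).1 := by
      intro d hd1 hd2 hddvd
      by_cases hdi : d < i
      · exact hmin d hd1 hdi (hddvd.trans hbdvd)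
      · have hde : d = i := by omega
        subst hde
        exact hbni hddvd
    have hble : (pvBinner (n.toNat + 1) i n []).1 ≤ n := Int.le_of_dvd (by omega) hbdvd
    have hsqrt : (Nat.sqrt (pvBinner (n.toNat + 1) i n []).1.toNat : Int) < s := by
      have hmono : Nat.sqrt (pvBinner (n.toNat + 1) i n []).1.toNat ≤ Nat.sqrt n.toNat :=
        Nat.sqrt_le_sqrt (by omega)
      omega
    have hrec := ih (i + 1) s (pvBinner (n.toNat + 1) i n []).1 (by omega) (by omega) hb1
      hmin' hsqrt
    have hstep : pvBloop (i :: PySem.List.pyRange (i + 1) s 1) n [] =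
        ((pvBloop (PySem.List.pyRange (i + 1) s 1) (pvBinner (n.toNat + 1) i n []).1 []).1,
          (pvBinner (n.toNat + 1) i n []).2 ++
            (pvBloop (PySem.List.pyRange (i + 1) s 1) (pvBinner (n.toNat + 1) i n []).1 []).2) := by
      show pvBloop _ (pvBinner (n.toNat + 1) i n []).1 (pvBinner (n.toNat + 1) i n []).2 = _
      rw [pvBloop_acc]
    rw [hstep, hblist, ← hrec]
    rw [pvMkFull, pvMkFull]
    by_cases hgt : (pvBloop (PySem.List.pyRange (i + 1) s 1) (pvBinner (n.toNat + 1) i n []).1 []).1 > 1 <;>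
      simp [hgt]

-- ===== VERDICT (by name: the statement is the Claim_ definition above) =====
theorem pos_of_prime_divisors_spec : Claim_equal_pos_of_prime_divisors := by
  intro n k _ hpre
  unfold Spec_pos_of_prime_divisors
  by_cases hn : 0 < n
  · have hA : pos_of_prime_divisors n k = pvSelect (pvFactors n) k := by
      rw [pos_of_prime_divisors,
        pvLoop_spec k _ n 0 hn (fun i hi => ((PySem.List.mem_pyRange_one).mp hi).1),
        pvBloop_fact (pvIsqrt n + 1 - 2).toNat 2 (pvIsqrt n + 1) n rfl (by omega) (by omega)
          (fun d hd1 hd2 h => by omega) (by unfold pvIsqrt; omega)]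
      congr 1
      omega
    have hB : pos_of_prime_divisors_alt n k = pvSelect (pvFactors n) k := by
      rw [pos_of_prime_divisors_alt]
      by_cases hk : k < 1
      · rw [if_pos hk, pvSelect, if_neg (by omega)]
      · rw [if_neg hk]
        exact pvBwhile_eq n.toNat n k rfl (by omega) (by omega)
    rw [hA, hB]
  · have hn0 : n = 0 := by
      unfold Pre_pos_of_prime_divisors at hpre; omega
    subst hn0
    have hr : PySem.List.pyRange 2 (pvIsqrt 0 + 1) 1 = [] := by decide
    have hA : pos_of_prime_divisors 0 k = -1 := by
      rw [pos_of_prime_divisors, hr, pvAloop]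
      norm_num
    have hB : pos_of_prime_divisors_alt 0 k = -1 := by
      rw [pos_of_prime_divisors_alt]
      by_cases hk : k < 1
      · rw [if_pos hk]
      · rw [if_neg hk, pvBwhile, dif_neg (by omega)]
    rw [hA, hB]

@[simp]
theorem pos_of_prime_divisors_raises : Claim_raises_pos_of_prime_divisors := by
  unfold Claim_raises_pos_of_prime_divisors
  refine ⟨fun n k _ hr hp => ?_, by decide, by decide, ?_⟩
  · unfold Raises_pos_of_prime_divisors at hr
    unfold Pre_pos_of_prime_divisors at hp
    omega
  · show pos_of_prime_divisors_alt (-4) 1 = -1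
    rw [pos_of_prime_divisors_alt, if_neg (by norm_num), pvBwhile, dif_neg (by norm_num)]
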